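-- pv_equiv track=rewrite | github.com/zaczzy/LeetCode | min_dec_subsequence.py | min_dec_subsequence
-- ===== SOURCE A (Python) =====
-- import bisect
--
-- def min_dec_subsequence(nums):
--     """Given a list of numbers, return the minimum number of strictly decreasing sub-sequences.
--     In a real world scenario, given a list of children in a line, assign the children from the head of the line to
--     different queues such that each queue goes from tallest to shortest and the number of queues is minimum.
--     """
--     num_subseq = 0
--     subseq_ends = []  # the heights of those children at the end of each queue, in sorted order
--     for num in nums:
--         pos = bisect.bisect(subseq_ends, num)
--         if pos == len(subseq_ends):
--             num_subseq += 1
--             subseq_ends.insert(pos, num)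
--         else:
--             subseq_ends[pos] = num
--     return num_subseq
-- ===== SOURCE B (Python) =====
-- def min_dec_subsequence(nums):
--     """Minimum number of strictly decreasing subsequences covering nums
--     = length of the longest non-decreasing subsequence, by direct O(n^2) DP."""
--     n = len(nums)
--     dp = [1] * n
--     ans = 0
--     for i in range(n):
--         for j in range(i):
--             if nums[j] <= nums[i]:
--                 dp[i] = max(dp[i], dp[j] + 1)
--         ans = max(ans, dp[i])
--     return ans
-- ===== Notes on version B (the rewrite author's own statement) =====
-- stated objective: simpler
-- what changed: Replaced the patience-sorting/bisect tails structure by a direct O(n^2) dynamic program for the length of the longest non-decreasing subsequence (dp[i] = 1 + max dp[j] over j<i with nums[j] <= nums[i], answer = max dp).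
import Mathlib
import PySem

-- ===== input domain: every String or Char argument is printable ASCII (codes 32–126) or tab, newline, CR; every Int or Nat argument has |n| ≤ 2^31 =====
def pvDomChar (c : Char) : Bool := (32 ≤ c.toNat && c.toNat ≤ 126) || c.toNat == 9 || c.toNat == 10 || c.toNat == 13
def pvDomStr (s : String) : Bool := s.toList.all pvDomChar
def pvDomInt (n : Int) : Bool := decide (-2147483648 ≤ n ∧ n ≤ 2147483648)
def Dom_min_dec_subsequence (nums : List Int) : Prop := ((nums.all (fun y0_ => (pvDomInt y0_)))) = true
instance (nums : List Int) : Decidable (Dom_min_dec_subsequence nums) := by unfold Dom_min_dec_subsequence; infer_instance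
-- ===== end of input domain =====

-- B replaces A's patience-sorting/bisect tails list by the direct O(n^2) DP for the
-- longest non-decreasing subsequence; objective: simpler (no speed claim).

-- ===== PORT A =====
-- bisect.bisect(subseq_ends, num): insertion point after existing entries ≤ num.
-- subseq_ends is always sorted (invariant of A, proved below), on which this
-- linear definition is exactly bisect_right's value.
def bisectR : List Int → Int → Nat
  | [], _ => 0
  | h :: tl, x => if h ≤ x then bisectR tl x + 1 else 0

def stepA (s : Int × List Int) (num : Int) : Int × List Int :=
  let pos := bisectR s.2 num
  if pos = s.2.length then (s.1 + 1, s.2 ++ [num])   -- insert at end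
  else (s.1, s.2.set pos num)                        -- subseq_ends[pos] = num

def min_dec_subsequence (nums : List Int) : Int :=
  (nums.foldl stepA (0, [])).1

-- ===== PORT B =====
-- bestEnd pairs x: dp[i] after the inner loop, where pairs holds (nums[j], dp[j]) for j < i.
def bestEnd (pairs : List (Int × Int)) (x : Int) : Int :=
  pairs.foldl (fun a p => if p.1 ≤ x then max a (p.2 + 1) else a) 1

def stepB (s : List (Int × Int) × Int) (num : Int) : List (Int × Int) × Int :=
  let d := bestEnd s.1 num
  (s.1 ++ [(num, d)], max s.2 d)

def min_dec_subsequence_alt (nums : List Int) : Int :=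
  (nums.foldl stepB ([], 0)).2

-- ===== PRECONDITION & SPEC =====
def Spec_min_dec_subsequence (nums : List Int) (out : Int) : Prop := out = min_dec_subsequence_alt nums
instance (nums : List Int) (out : Int) : Decidable (Spec_min_dec_subsequence nums out) := by unfold Spec_min_dec_subsequence; infer_instance

-- ===== CLAIM (what is proved, stated in full; the proofs are below) =====
def Claim_equal_min_dec_subsequence : Prop := ∀ (nums : List Int), Dom_min_dec_subsequence nums → Spec_min_dec_subsequence nums (min_dec_subsequence nums)

-- ===== LEMMAS AND PROOFS =====

theorem bisectR_le_length (t : List Int) (x : Int) : bisectR t x ≤ t.length := by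
  induction t with
  | nil => simp [bisectR]
  | cons h tl ih => simp only [bisectR, List.length_cons]; split <;> omega

theorem bisectR_append (l m : List Int) (x : Int) :
    bisectR (l ++ m) x =
      if bisectR l x = l.length then l.length + bisectR m x else bisectR l x := by
  induction l with
  | nil => simp [bisectR]
  | cons h tl ih =>
    simp only [List.cons_append, bisectR, List.length_cons]
    split
    · rw [ih]
      by_cases hc : bisectR tl x = tl.length
      · simp [hc]; omega
      · have : ¬ (bisectR tl x + 1 = tl.length + 1) := by omega
        simp [hc]
    · have hne : ¬ ((0 : Nat) = tl.length + 1) := by omega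
      simp

theorem bisectR_all_le (t : List Int) (x : Int) (h : bisectR t x = t.length) :
    ∀ y ∈ t, y ≤ x := by
  induction t with
  | nil => simp
  | cons a tl ih =>
    simp only [bisectR, List.length_cons] at h
    by_cases ha : a ≤ x
    · simp only [ha, if_true] at h
      intro y hy
      rcases List.mem_cons.mp hy with rfl | hy'
      · exact ha
      · exact ih (by omega) y hy'
    · simp only [ha, if_false] at h; omega

theorem bisectR_eq_length_of_all (t : List Int) (x : Int) (h : ∀ y ∈ t, y ≤ x) :
    bisectR t x = t.length := by
  induction t with
  | nil => rfl
  | cons a tl ih =>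
    have ha : a ≤ x := h a (by simp)
    simp [bisectR, ha, ih (fun y hy => h y (List.mem_cons_of_mem _ hy))]

theorem bisectR_eq_zero (t : List Int) (x : Int) (h : ∀ y ∈ t, x < y) :
    bisectR t x = 0 := by
  cases t with
  | nil => rfl
  | cons a tl =>
    have : ¬ a ≤ x := by have := h a (by simp); omega
    simp [bisectR, this]

theorem sorted_set (t : List Int) (v : Int)
    (hs : t.Pairwise (· ≤ ·)) (hlt : bisectR t v < t.length) :
    (t.set (bisectR t v) v).Pairwise (· ≤ ·) := by
  induction t with
  | nil => simp [bisectR]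
  | cons a tl ih =>
    rcases List.pairwise_cons.mp hs with ⟨ha, htl⟩
    by_cases hav : a ≤ v
    · simp only [bisectR, hav, if_true, List.set_cons_succ]
      refine List.pairwise_cons.mpr ⟨?_, ?_⟩
      · intro y hy
        rcases List.mem_or_eq_of_mem_set hy with hmem | rfl
        · exact ha y hmem
        · exact hav
      · exact ih htl (by simpa [bisectR, hav] using hlt)
    · simp only [bisectR, hav, if_false, List.set_cons_zero]
      refine List.pairwise_cons.mpr ⟨?_, htl⟩
      intro y hy
      exact le_trans (le_of_lt (by omega)) (ha y hy)

theorem bisectR_set (t : List Int) (v : Int)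
    (hs : t.Pairwise (· ≤ ·)) (hlt : bisectR t v < t.length) (x : Int) :
    bisectR (t.set (bisectR t v) v) x =
      if v ≤ x then max (bisectR t x) (bisectR t v + 1) else bisectR t x := by
  induction t with
  | nil => simp [bisectR] at hlt
  | cons a tl ih =>
    rcases List.pairwise_cons.mp hs with ⟨ha, htl⟩
    by_cases hav : a ≤ v
    · -- pos = bisectR tl v + 1; replacement happens inside tl
      have hlt' : bisectR tl v < tl.length := by
        simpa [bisectR, hav] using hlt
      simp only [bisectR, hav, if_true, List.set_cons_succ]
      by_cases hax : a ≤ x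
      · simp only [hax, if_true, ih htl hlt']
        by_cases hvx : v ≤ x
        · simp [hvx, Nat.succ_max_succ]
        · simp [hvx]
      · -- a > x; if v ≤ x then v < a ≤ v contradiction
        have hvx : ¬ v ≤ x := by intro hvx; omega
        simp [hax, hvx]
    · -- pos = 0; head replaced by v
      simp only [bisectR, hav, if_false, List.set_cons_zero]
      by_cases hvx : v ≤ x
      · simp only [hvx, if_true]
        by_cases hax : a ≤ x
        · simp [hax]
        · have h0 : bisectR tl x = 0 := by
            apply bisectR_eq_zero
            intro y hy
            have := ha y hy
            omega
          simp [hax, h0]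
      · have hax : ¬ a ≤ x := by intro hax; omega
        simp [hvx, hax]

theorem bestEnd_append (pairs : List (Int × Int)) (v d x : Int) :
    bestEnd (pairs ++ [(v, d)]) x =
      if v ≤ x then max (bestEnd pairs x) (d + 1) else bestEnd pairs x := by
  simp [bestEnd, List.foldl_append]

-- The coupling invariant between A's state (cnt, tails) and B's state (pairs, ans).
def InvAB (t : List Int) (pairs : List (Int × Int)) (cnt ans : Int) : Prop :=
  t.Pairwise (· ≤ ·) ∧ cnt = (t.length : Int) ∧ ans = (t.length : Int) ∧
    ∀ x : Int, ((bisectR t x : Int) + 1 = bestEnd pairs x)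

theorem inv_step (t : List Int) (pairs : List (Int × Int)) (cnt ans v : Int)
    (h : InvAB t pairs cnt ans) :
    InvAB (stepA (cnt, t) v).2 (stepB (pairs, ans) v).1
        (stepA (cnt, t) v).1 (stepB (pairs, ans) v).2 := by
  rcases h with ⟨hs, hc, ha, hb⟩
  have hd : bestEnd pairs v = (bisectR t v : Int) + 1 := (hb v).symm
  by_cases hpos : bisectR t v = t.length
  · -- append case
    have hall : ∀ y ∈ t, y ≤ v := bisectR_all_le t v hpos
    simp only [stepA, stepB, hpos, if_true]
    refine ⟨?_, ?_, ?_, ?_⟩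
    · refine List.pairwise_append.mpr ⟨hs, by simp, ?_⟩
      intro y hy z hz
      simp only [List.mem_singleton] at hz
      subst hz; exact hall y hy
    · simp [hc]
    · -- max ans (bestEnd pairs v) = len + 1
      simp only [List.length_append, List.length_singleton]
      rw [ha, hd, hpos]
      push_cast
      omega
    · intro x
      rw [bestEnd_append, bisectR_append]
      by_cases hvx : v ≤ x
      · have hallx : bisectR t x = t.length :=
          bisectR_eq_length_of_all t x (fun y hy => le_trans (hall y hy) hvx)
        rw [← hb x]
        simp only [hallx, if_true, hvx, if_true]
        simp only [bisectR, hvx, if_true]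
        push_cast
        have := bisectR_le_length t x
        omega
      · rw [← hb x]
        simp only [hvx, if_false]
        split
        · next hcond => simp [bisectR, hvx, ← hcond]
        · rfl
  · -- set case
    have hlt : bisectR t v < t.length := lt_of_le_of_ne (bisectR_le_length t v) hpos
    simp only [stepA, stepB, hpos, if_false]
    refine ⟨sorted_set t v hs hlt, by simpa using hc, ?_, ?_⟩
    · simp only [List.length_set]
      rw [ha, hd]
      have := bisectR_le_length t v
      omega
    · intro x
      rw [bestEnd_append, bisectR_set t v hs hlt x, ← hb x, hd]
      by_cases hvx : v ≤ x
      · simp only [hvx, if_true]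
        push_cast
        omega
      · simp [hvx]

theorem fold_eq (nums : List Int) :
    ∀ (t : List Int) (pairs : List (Int × Int)) (cnt ans : Int),
      InvAB t pairs cnt ans →
      (nums.foldl stepA (cnt, t)).1 = (nums.foldl stepB (pairs, ans)).2 := by
  induction nums with
  | nil =>
    intro t pairs cnt ans h
    rcases h with ⟨_, hc, ha, _⟩
    simp [hc, ha]
  | cons v rest ih =>
    intro t pairs cnt ans h
    have hstep := inv_step t pairs cnt ans v h
    simp only [List.foldl_cons]
    have := ih (stepA (cnt, t) v).2 (stepB (pairs, ans) v).1
      (stepA (cnt, t) v).1 (stepB (pairs, ans) v).2 hstep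
    simpa using this

-- ===== VERDICT (by name: the statement is the Claim_ definition above) =====
theorem min_dec_subsequence_spec : Claim_equal_min_dec_subsequence := by
  intro nums _
  show min_dec_subsequence nums = min_dec_subsequence_alt nums
  unfold min_dec_subsequence min_dec_subsequence_alt
  exact fold_eq nums [] [] 0 0 ⟨List.Pairwise.nil, rfl, rfl, fun x => by simp [bisectR, bestEnd]⟩
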